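-- pv_equiv track=rewrite | github.com/Majbor1/prg-basics | 04-Functions/7_18.py | f
-- ===== SOURCE A (Python) =====
-- def f(number):
--     number = str(number)
--     sum = 0
--     for digit in "0123456789":
--         count = number.count(digit)
--         if count > 1:
--             sum += int(digit) * count
--     return sum
-- ===== SOURCE B (Python) =====
-- def f(number):
--     s = sorted(str(number))
--     total = 0
--     i = 0
--     while i < len(s):
--         j = i + 1
--         while j < len(s) and s[j] == s[i]:
--             j += 1
--         if j - i > 1:
--             total += int(s[i]) * (j - i)
--         i = j
--     return total
-- ===== Notes on version B (the rewrite author's own statement) =====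
-- stated objective: alternative
-- what changed: A scans the whole string once per digit (ten fixed .count passes); B sorts the characters once and does a single run-length scan over the sorted string, adding int(ch)*runlen for each multi-character run (single-character runs, including the '-' sign, are skipped and never int-converted).
import Mathlib
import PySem

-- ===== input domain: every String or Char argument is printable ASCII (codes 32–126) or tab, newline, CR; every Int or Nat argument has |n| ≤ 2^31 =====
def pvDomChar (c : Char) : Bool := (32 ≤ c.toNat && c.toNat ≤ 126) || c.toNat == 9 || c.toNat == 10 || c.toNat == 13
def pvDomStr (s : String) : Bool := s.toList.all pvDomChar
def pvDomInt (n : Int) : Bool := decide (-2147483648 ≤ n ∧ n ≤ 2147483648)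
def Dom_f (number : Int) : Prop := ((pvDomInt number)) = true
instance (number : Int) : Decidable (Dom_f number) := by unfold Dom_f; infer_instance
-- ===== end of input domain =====

-- B replaces A's ten repeated `.count` scans with one sort of the characters plus a
-- single run-length scan of the sorted string (objective: alternative).

-- ===== PORT A =====
-- A: for each digit in "0123456789", scan the whole string with .count.
def f (number : Int) : Int :=
  let numberS : String := PySem.Int.toStr number
  "0123456789".toList.foldl
    (fun sum digit =>
      let count : Int := (PySem.Str.count numberS (String.ofList [digit]) : Nat)
      if count > 1 then
        -- int(digit): digit ∈ "0123456789", so ofChars? always returns some; getD 0 unreachable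
        sum + (PySem.Int.ofChars? [digit]).getD 0 * count
      else sum)
    0

-- ===== PORT B =====
-- B's outer while loop over the sorted character list: each step consumes one run
-- (the inner `while s[j] == s[i]` scan is the takeWhile; `i = j` is the dropWhile).
def fAltGo (s : List Char) (total : Int) : Int :=
  match s with
  | [] => total
  | c :: t =>
    let run := t.takeWhile (fun x => x == c)
    let k : Int := 1 + (run.length : Int)
    let rest := t.dropWhile (fun x => x == c)
    -- int(s[i]): only reached when the run is longer than 1, so never on '-'; getD 0 unreachable
    fAltGo rest (if k > 1 then total + (PySem.Int.ofChars? [c]).getD 0 * k else total)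
termination_by s.length
decreasing_by
  have h := (List.dropWhile_sublist (l := t) (p := fun x => x == c)).length_le
  simp only [List.length_cons]
  omega

def f_alt (number : Int) : Int :=
  fAltGo (PySem.List.sorted (PySem.Int.toStr number).toList (fun x => x) false) 0

-- ===== PRECONDITION & SPEC =====
def Spec_f (number : Int) (out : Int) : Prop := out = f_alt number
instance (number : Int) (out : Int) : Decidable (Spec_f number out) := by unfold Spec_f; infer_instance

-- ===== CLAIM (what is proved, stated in full; the proofs are below) =====
def Claim_equal_f : Prop := ∀ (number : Int), Dom_f number → Spec_f number (f number)

-- ===== LEMMAS AND PROOFS =====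

-- the per-character contribution of B's run scan
def cB (zs : List Char) (c : Char) : Int :=
  if ((zs.count c : Nat) : Int) > 1 then
    (PySem.Int.ofChars? [c]).getD 0 * ((zs.count c : Nat) : Int)
  else 0

-- the per-digit contribution of A's ten-count loop
def cA (zs : List Char) (c : Char) : Int :=
  if PySem.Chars.isdigit c ∧ ((zs.count c : Nat) : Int) > 1 then
    (PySem.Int.ofChars? [c]).getD 0 * ((zs.count c : Nat) : Int)
  else 0

-- Chars.count of a single-character needle counts the character's occurrences.
theorem count_go_singleton (c : Char) (l : List Char) (fuel acc : Nat)
    (h : l.length <= fuel) :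
    PySem.Chars.count.go [c] fuel l acc = acc + l.count c := by
  induction l generalizing fuel acc with
  | nil => cases fuel <;> simp [PySem.Chars.count.go]
  | cons x t ih =>
      cases fuel with
      | zero => simp at h
      | succ fuel =>
          have ht : t.length <= fuel := by simpa using h
          rw [show PySem.Chars.count.go [c] (fuel+1) (x::t) acc
              = if [c].isPrefixOf (x::t) then
                  PySem.Chars.count.go [c] fuel (List.drop 1 (x::t)) (acc+1)
                else PySem.Chars.count.go [c] fuel t acc from rfl]
          by_cases hx : c = x
          · subst hx
            rw [if_pos (by simp [List.isPrefixOf])]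
            simp only [List.drop_succ_cons, List.drop_zero]
            rw [ih fuel (acc+1) ht]
            simp
            omega
          · have hpre : ([c].isPrefixOf (x::t)) = false := by
              simp [List.isPrefixOf, hx]
            rw [hpre]
            simp only [Bool.false_eq_true, if_false]
            rw [ih fuel acc ht]
            simp [Ne.symm hx]

theorem count_singleton (s : List Char) (c : Char) :
    PySem.Chars.count s [c] = s.count c := by
  have : ([c].isEmpty) = false := rfl
  simp only [PySem.Chars.count, this, Bool.false_eq_true, if_false]
  simpa using count_go_singleton c s s.length 0 (le_refl _)

-- every char satisfying isdigit is one of the ten digit characters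
theorem isdigit_mem (c : Char) (h : PySem.Chars.isdigit c = true) :
    c ∈ ("0123456789".toList) := by
  simp only [PySem.Chars.isdigit, Bool.and_eq_true, decide_eq_true_eq] at h
  obtain ⟨h1, h2⟩ := h
  have h1' : 48 <= c.toNat := h1
  have h2' : c.toNat <= 57 := h2
  have heq : ∀ b : Char, c.toNat = b.toNat → c = b :=
    fun b hb => Char.ext (UInt32.toNat_inj.mp hb)
  have hd : c.toNat = 48 ∨ c.toNat = 49 ∨ c.toNat = 50 ∨ c.toNat = 51 ∨ c.toNat = 52 ∨
      c.toNat = 53 ∨ c.toNat = 54 ∨ c.toNat = 55 ∨ c.toNat = 56 ∨ c.toNat = 57 := by omega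
  rcases hd with h|h|h|h|h|h|h|h|h|h
  · rw [heq '0' (by rw [h]; rfl)]; decide
  · rw [heq '1' (by rw [h]; rfl)]; decide
  · rw [heq '2' (by rw [h]; rfl)]; decide
  · rw [heq '3' (by rw [h]; rfl)]; decide
  · rw [heq '4' (by rw [h]; rfl)]; decide
  · rw [heq '5' (by rw [h]; rfl)]; decide
  · rw [heq '6' (by rw [h]; rfl)]; decide
  · rw [heq '7' (by rw [h]; rfl)]; decide
  · rw [heq '8' (by rw [h]; rfl)]; decide
  · rw [heq '9' (by rw [h]; rfl)]; decide

-- a foldl accumulating conditional additions is the sum of a map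
theorem foldl_if_add {α : Type} (p : α → Prop) [DecidablePred p] (v : α → Int)
    (l : List α) (a : Int) :
    l.foldl (fun acc x => if p x then acc + v x else acc) a
      = a + (l.map (fun x => if p x then v x else 0)).sum := by
  induction l generalizing a with
  | nil => simp
  | cons x t ih =>
      simp only [List.foldl_cons, List.map_cons, List.sum_cons]
      by_cases hx : p x
      · rw [if_pos hx, if_pos hx, ih]; ring
      · rw [if_neg hx, if_neg hx, ih]; ring

-- every element past a run of c's in a ≤-sorted list is > c
theorem dropWhile_gt (c : Char) (t : List Char)
    (hp : t.Pairwise (· ≤ ·)) (hge : ∀ x ∈ t, c ≤ x) :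
    ∀ x ∈ t.dropWhile (fun x => x == c), c < x := by
  intro x hx
  rcases hr : t.dropWhile (fun x => x == c) with _ | ⟨d, r⟩
  · simp [hr] at hx
  · have hsub : (d :: r).Sublist t := hr ▸ List.dropWhile_sublist _
    have hd_ne : (d == c) = false := by
      have := List.head_dropWhile_not (fun x => x == c) (l := t) (by simp [hr])
      simpa [hr] using this
    have hdt : d ∈ t := hsub.mem (by simp)
    have hcd : c < d := lt_of_le_of_ne (hge d hdt) (by simpa using (Ne.symm (by simpa using hd_ne)))
    have hpr : (d :: r).Pairwise (· ≤ ·) := hp.sublist hsub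
    rw [hr] at hx
    rcases List.mem_cons.mp hx with rfl | hxr
    · exact hcd
    · exact lt_of_lt_of_le hcd ((List.pairwise_cons.mp hpr).1 x hxr)

-- B's run scan on a sorted list computes the Finset sum of cB over the distinct chars
theorem fAltGo_eq (ys : List Char) (a : Int) (h : ys.Pairwise (· ≤ ·)) :
    fAltGo ys a = a + ∑ c ∈ ys.toFinset, cB ys c := by
  induction ys, a using fAltGo.induct with
  | case1 a => simp [fAltGo]
  | case2 a c t run' k' rest' ih =>
    set run := t.takeWhile (fun x => x == c) with hrun
    set rest := t.dropWhile (fun x => x == c) with hrest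
    have hsplit : run ++ rest = t := List.takeWhile_append_dropWhile
    have hrunAll : ∀ x ∈ run, x = c := by
      intro x hx
      have := List.mem_takeWhile_imp hx
      simpa using this
    have hpt : t.Pairwise (· ≤ ·) := (List.pairwise_cons.mp h).2
    have hge : ∀ x ∈ t, c ≤ x := (List.pairwise_cons.mp h).1
    have hgt : ∀ x ∈ rest, c < x := dropWhile_gt c t hpt hge
    have hcnr : c ∉ rest := fun hc => lt_irrefl c (hgt c hc)
    have hcount_run : run.count c = run.length := by
      rw [List.count_eq_length.mpr (fun x hx => ((hrunAll x hx).symm : c = x))]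
    have hcount_rest : rest.count c = 0 := List.count_eq_zero.mpr hcnr
    have hcount_c : (c :: t).count c = 1 + run.length := by
      rw [List.count_cons, ← hsplit, List.count_append, hcount_run, hcount_rest]
      simp [Nat.add_comm]
    have hcount_x : ∀ x ∈ rest, (c :: t).count x = rest.count x := by
      intro x hx
      have hxc : x ≠ c := fun he => lt_irrefl c (he ▸ hgt x hx)
      have hxrun : run.count x = 0 :=
        List.count_eq_zero.mpr (fun hxr => hxc (hrunAll x hxr))
      rw [List.count_cons, ← hsplit, List.count_append, hxrun]
      simp [Ne.symm hxc]
    have hfin : (c :: t).toFinset = insert c rest.toFinset := by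
      ext x
      simp only [List.mem_toFinset, List.mem_cons, Finset.mem_insert, ← hsplit,
        List.mem_append]
      constructor
      · rintro (rfl | hx | hx)
        · exact Or.inl rfl
        · exact Or.inl (hrunAll x hx)
        · exact Or.inr (by simpa using hx)
      · rintro (rfl | hx)
        · exact Or.inl rfl
        · exact Or.inr (Or.inr (by simpa using hx))
    have hprest : rest.Pairwise (· ≤ ·) := hpt.sublist (List.dropWhile_sublist _)
    rw [fAltGo]
    have ih' : fAltGo rest (if 1 + ((List.takeWhile (fun x => x == c) t).length : Int) > 1 then
          a + (PySem.Int.ofChars? [c]).getD 0 * (1 + ((List.takeWhile (fun x => x == c) t).length : Int))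
        else a)
        = (if 1 + ((List.takeWhile (fun x => x == c) t).length : Int) > 1 then
          a + (PySem.Int.ofChars? [c]).getD 0 * (1 + ((List.takeWhile (fun x => x == c) t).length : Int))
        else a) + ∑ x ∈ rest.toFinset, cB rest x := ih hprest
    rw [ih']
    have hcongr : ∑ x ∈ rest.toFinset, cB rest x = ∑ x ∈ rest.toFinset, cB (c :: t) x := by
      apply Finset.sum_congr rfl
      intro x hx
      unfold cB
      rw [hcount_x x (List.mem_toFinset.mp hx)]
    rw [hcongr, hfin, Finset.sum_insert (by simpa using hcnr)]
    have hcB_c : cB (c :: t) c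
        = if (1 + (run.length : Int)) > 1 then
            (PySem.Int.ofChars? [c]).getD 0 * (1 + (run.length : Int)) else 0 := by
      unfold cB
      rw [hcount_c]
      push_cast
      ring_nf
    rw [hcB_c]
    split_ifs with hk
    · ring
    · ring

-- chars produced by Nat.toDigits base 10 are decimal digits
theorem isdigit_digitChar (d : Nat) (h : d < 10) :
    PySem.Chars.isdigit (Nat.digitChar d) = true := by
  interval_cases d <;> decide

theorem mem_toDigitsCore (fuel : Nat) :
    ∀ (n : Nat) (l : List Char) (c : Char), c ∈ Nat.toDigitsCore 10 fuel n l →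
      c ∈ l ∨ PySem.Chars.isdigit c = true := by
  induction fuel with
  | zero => intro n l c hc; exact Or.inl (by simpa [Nat.toDigitsCore] using hc)
  | succ fuel ih =>
    intro n l c hc
    rw [Nat.toDigitsCore] at hc
    by_cases hz : n / 10 = 0
    · rw [if_pos hz] at hc
      rcases List.mem_cons.mp hc with rfl | hcl
      · exact Or.inr (isdigit_digitChar _ (Nat.mod_lt _ (by norm_num)))
      · exact Or.inl hcl
    · rw [if_neg hz] at hc
      rcases ih (n / 10) (Nat.digitChar (n % 10) :: l) c hc with hcl | hd
      · rcases List.mem_cons.mp hcl with rfl | hcl'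
        · exact Or.inr (isdigit_digitChar _ (Nat.mod_lt _ (by norm_num)))
        · exact Or.inl hcl'
      · exact Or.inr hd

theorem mem_toDigits (m : Nat) (c : Char) (h : c ∈ Nat.toDigits 10 m) :
    PySem.Chars.isdigit c = true := by
  rcases mem_toDigitsCore (m + 1) m [] c h with hl | hd
  · simp at hl
  · exact hd

-- every char of str(n) is a digit or the sign '-', and '-' occurs at most once
theorem toChars_classify (n : Int) :
    (∀ c ∈ PySem.Int.toChars n, c = '-' ∨ PySem.Chars.isdigit c = true) ∧
    (PySem.Int.toChars n).count '-' ≤ 1 := by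
  have hnod : ∀ m : Nat, (Nat.toDigits 10 m).count '-' = 0 := by
    intro m
    apply List.count_eq_zero.mpr
    intro hmem
    have := mem_toDigits m '-' hmem
    simp [PySem.Chars.isdigit] at this
  unfold PySem.Int.toChars
  split_ifs with hneg
  · constructor
    · intro c hc
      rcases List.mem_cons.mp hc with rfl | hc'
      · exact Or.inl rfl
      · exact Or.inr (mem_toDigits _ c hc')
    · rw [List.count_cons, hnod]
      simp
  · constructor
    · intro c hc
      exact Or.inr (mem_toDigits _ c hc)
    · rw [hnod]
      omega

-- on the chars of str(n), cA and cB agree pointwise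
theorem cA_eq_cB (n : Int) (c : Char) (hc : c ∈ PySem.Int.toChars n) :
    cA (PySem.Int.toChars n) c = cB (PySem.Int.toChars n) c := by
  obtain ⟨hclass, hcount⟩ := toChars_classify n
  rcases hclass c hc with rfl | hdig
  · unfold cA cB
    rw [if_neg, if_neg]
    · intro hgt
      omega
    · rintro ⟨hd, -⟩
      simp [PySem.Chars.isdigit] at hd
  · unfold cA cB
    simp [hdig]

-- the ten-digit Finset sum of cA equals the distinct-chars Finset sum of cA
theorem sumA_eq (xs : List Char) :
    ∑ d ∈ ("0123456789".toList).toFinset, cA xs d = ∑ c ∈ xs.toFinset, cA xs c := by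
  have hA : ∑ d ∈ ("0123456789".toList).toFinset, cA xs d
      = ∑ d ∈ ("0123456789".toList).toFinset ∪ xs.toFinset, cA xs d := by
    apply Finset.sum_subset Finset.subset_union_left
    intro k _ hk
    simp only [List.mem_toFinset] at hk
    unfold cA
    rw [if_neg]
    rintro ⟨hd, -⟩
    exact hk (isdigit_mem k hd)
  have hB : ∑ c ∈ xs.toFinset, cA xs c
      = ∑ d ∈ ("0123456789".toList).toFinset ∪ xs.toFinset, cA xs d := by
    apply Finset.sum_subset Finset.subset_union_right
    intro k _ hk
    simp only [List.mem_toFinset] at hk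
    have hc : xs.count k = 0 := List.count_eq_zero.mpr hk
    unfold cA
    rw [if_neg]
    rintro ⟨-, hgt⟩
    rw [hc] at hgt
    simp at hgt
  rw [hA, hB]

set_option maxRecDepth 16384 in
theorem f_eq (number : Int) : f number = f_alt number := by
  have hxs : (PySem.Int.toStr number).toList = PySem.Int.toChars number :=
    PySem.Int.toList_toStr number
  set xs := PySem.Int.toChars number with hxsdef
  set ys := PySem.List.sorted xs (fun x => x) false with hys
  have hperm : ys.Perm xs := PySem.List.sorted_perm xs (fun x => x) false
  have hpair : ys.Pairwise (· ≤ ·) := by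
    have := PySem.List.sorted_pairwise (xs := xs) (key := fun x => x)
    simpa using this
  -- A's side: the foldl is the Finset sum of cA over the ten digits
  have hAside : f number = ∑ d ∈ ("0123456789".toList).toFinset, cA xs d := by
    show "0123456789".toList.foldl
      (fun sum digit =>
        if ((PySem.Str.count (PySem.Int.toStr number) (String.ofList [digit]) : Nat) : Int) > 1 then
          sum + (PySem.Int.ofChars? [digit]).getD 0 *
            ((PySem.Str.count (PySem.Int.toStr number) (String.ofList [digit]) : Nat) : Int)
        else sum) 0 = _
    rw [foldl_if_add
      (fun d => ((PySem.Str.count (PySem.Int.toStr number) (String.ofList [d]) : Nat) : Int) > 1)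
      (fun d => (PySem.Int.ofChars? [d]).getD 0 *
        ((PySem.Str.count (PySem.Int.toStr number) (String.ofList [d]) : Nat) : Int))]
    have hmap : ("0123456789".toList).map
        (fun d => if ((PySem.Str.count (PySem.Int.toStr number) (String.ofList [d]) : Nat) : Int) > 1 then
            (PySem.Int.ofChars? [d]).getD 0 *
              ((PySem.Str.count (PySem.Int.toStr number) (String.ofList [d]) : Nat) : Int)
          else 0)
        = ("0123456789".toList).map (cA xs) := by
      apply List.map_congr_left
      intro d hd
      have hdig : PySem.Chars.isdigit d = true := by
        have hlit : "0123456789".toList = ['0','1','2','3','4','5','6','7','8','9'] := rfl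
        rw [hlit] at hd
        fin_cases hd <;> rfl
      have hcnt : PySem.Str.count (PySem.Int.toStr number) (String.ofList [d]) = xs.count d := by
        rw [PySem.Str.count_eq]
        simp only [String.toList_ofList]
        rw [hxs, count_singleton]
      unfold cA
      rw [hcnt]
      simp [hdig]
    rw [hmap, zero_add, List.sum_toFinset _ (by decide : ("0123456789".toList).Nodup)]
  -- B's side: the run scan is the Finset sum of cB over the distinct chars
  have hBside : f_alt number = ∑ c ∈ xs.toFinset, cB xs c := by
    show fAltGo (PySem.List.sorted (PySem.Int.toStr number).toList (fun x => x) false) 0 = _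
    rw [hxs]
    rw [fAltGo_eq ys 0 hpair, zero_add]
    rw [List.toFinset_eq_of_perm ys xs hperm]
    apply Finset.sum_congr rfl
    intro x _
    unfold cB
    rw [hperm.count_eq]
  rw [hAside, hBside, sumA_eq]
  apply Finset.sum_congr rfl
  intro c hc
  exact cA_eq_cB number c (List.mem_toFinset.mp hc)

-- ===== VERDICT (by name: the statement is the Claim_ definition above) =====
theorem f_spec : Claim_equal_f := by
  intro number _
  unfold Spec_f
  exact f_eq number
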